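-- pv_equiv track=rewrite | github.com/jaycob24/Homeworkes | lab_3.py | Sixth
-- ===== SOURCE A (Python) =====
-- def Sixth(m):
--   d = {}
--   res = []
--   for n in m:
--     if n not in d:
--       d.setdefault(n, m.count(n))
--   d = sorted(d.items(), key=lambda x:x[1], reverse=True)
--   for pair in d:
--     for i in range(pair[1]):
--       res.append(pair[0])
--   return res
-- ===== SOURCE B (Python) =====
-- def Sixth(m):
--     cnt = {}
--     for x in m:
--         cnt[x] = cnt.get(x, 0) + 1
--     first = {}
--     for i, x in enumerate(m):
--         if x not in first:
--             first[x] = i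
--     return sorted(m, key=lambda x: (-cnt[x], first[x]))
-- ===== Notes on version B (the rewrite author's own statement) =====
-- stated objective: faster
-- what changed: Instead of building a unique-value dict with repeated m.count scans, sorting the pairs and re-expanding them with a nested append loop, B counts occurrences and first indices in one pass each and sorts the original list directly with the composite key (-count, first-occurrence index).
import Mathlib
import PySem

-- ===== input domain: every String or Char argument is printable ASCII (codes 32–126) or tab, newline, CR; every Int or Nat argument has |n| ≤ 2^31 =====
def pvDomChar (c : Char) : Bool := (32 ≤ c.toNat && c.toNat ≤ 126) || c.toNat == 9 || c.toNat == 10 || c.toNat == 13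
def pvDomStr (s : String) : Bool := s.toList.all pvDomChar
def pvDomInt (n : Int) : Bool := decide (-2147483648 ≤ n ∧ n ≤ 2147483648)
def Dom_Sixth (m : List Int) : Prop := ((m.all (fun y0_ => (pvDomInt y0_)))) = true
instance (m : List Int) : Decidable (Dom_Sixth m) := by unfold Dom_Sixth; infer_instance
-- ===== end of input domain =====

-- B sorts the original list once by the composite key (-count, first index) instead of
-- A's unique-value dict with repeated m.count scans, pair sort and nested re-expansion loop.

-- ===== PORT A =====
def Sixth (m : List Int) : List Int :=
  let d : PySem.Dict Int Int :=
    m.foldl (fun d n => if d.contains n then d else d.setdefault n ((PySem.List.count m n : Int)))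
      PySem.Dict.empty
  let ds := PySem.List.sorted d.items (fun x => x.2) true
  ds.foldl (fun res pair =>
    (PySem.List.pyRange 0 pair.2 1).foldl (fun res _ => res ++ [pair.1]) res) []

-- ===== PORT B =====
def Sixth_alt (m : List Int) : List Int :=
  let cnt : PySem.Dict Int Int :=
    m.foldl (fun d x => d.insert x (d.getD x 0 + 1)) PySem.Dict.empty
  let first : PySem.Dict Int Int :=
    (PySem.List.enumerate m).foldl (fun d p => if d.contains p.2 then d else d.insert p.2 p.1)
      PySem.Dict.empty
  PySem.List.sorted2 m (fun x => -(cnt.getD x 0)) (fun x => first.getD x 0) false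

-- ===== PRECONDITION & SPEC =====
def Spec_Sixth (m : List Int) (out : List Int) : Prop := out = Sixth_alt m
instance (m : List Int) (out : List Int) : Decidable (Spec_Sixth m out) := by unfold Spec_Sixth; infer_instance

-- ===== CLAIM (what is proved, stated in full; the proofs are below) =====
def Claim_equal_Sixth : Prop := ∀ (m : List Int), Dom_Sixth m → Spec_Sixth m (Sixth m)


-- ===== LEMMAS AND PROOFS =====

-- the count dict B builds, its first-index dict, and the derived key functions
def cntD (m : List Int) : PySem.Dict Int Int :=
  m.foldl (fun d x => d.insert x (d.getD x 0 + 1)) PySem.Dict.empty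

def fstD (m : List Int) : PySem.Dict Int Int :=
  (PySem.List.enumerate m).foldl (fun d p => if d.contains p.2 then d else d.insert p.2 p.1)
    PySem.Dict.empty

def cF (m : List Int) (x : Int) : Int := (cntD m).getD x 0
def fF (m : List Int) (x : Int) : Int := (fstD m).getD x 0

-- the order both outputs are sorted in: count descending, then first-occurrence index ascending
def leD (m : List Int) (a b : Int) : Prop :=
  cF m b < cF m a ∨ (cF m a = cF m b ∧ fF m a ≤ fF m b)

lemma alt_eq (m : List Int) :
    Sixth_alt m = PySem.List.sorted2 m (fun x => -(cF m x)) (fun x => fF m x) false := rfl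

lemma cF_eq (m : List Int) (x : Int) : cF m x = (List.count x m : Int) := by
  unfold cF cntD
  rw [PySem.Dict.getD_foldl_insert_add_one]
  simp [PySem.Dict.empty, PySem.Dict.getD, PySem.Dict.get?]

lemma fst_fold (x : Int) : ∀ (l : List Int) (k : Int) (d : PySem.Dict Int Int),
    ((PySem.List.enumerate l k).foldl
        (fun d p => if d.contains p.2 then d else d.insert p.2 p.1) d).getD x 0
      = if d.contains x = false ∧ x ∈ l then k + (l.idxOf x : Int) else d.getD x 0 := by
  intro l
  induction l with
  | nil => intro k d; simp [PySem.List.enumerate]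
  | cons y t ih =>
    intro k d
    have hstep : PySem.List.enumerate (y::t) k = (k, y) :: PySem.List.enumerate t (k+1) := rfl
    rw [hstep]
    simp only [List.foldl_cons]
    by_cases hc : d.contains y
    · rw [if_pos hc]
      rw [ih]
      by_cases hx : x = y
      · subst hx; simp [hc]
      · have hyx : (y == x) = false := by simp [Ne.symm hx]
        by_cases hm : x ∈ t <;>
          simp [hx, hm, List.idxOf_cons, hyx] <;> push_cast <;> (try split_ifs) <;> omega
    · rw [if_neg hc]
      rw [ih]
      by_cases hx : x = y
      · subst hx
        simp [hc]
      · have hyx : (y == x) = false := by simp [Ne.symm hx]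
        simp only [PySem.Dict.contains_insert, PySem.Dict.getD_insert, hx]
        by_cases hm : x ∈ t <;>
          simp [hm, hx, List.idxOf_cons, hyx] <;> push_cast <;> (try split_ifs) <;> omega

lemma fF_eq (m : List Int) (x : Int) (h : x ∈ m) : fF m x = (m.idxOf x : Int) := by
  unfold fF fstD
  rw [fst_fold]
  simp [PySem.Dict.empty, PySem.Dict.contains, h]

lemma leD_refl (m : List Int) (a : Int) : leD m a a := Or.inr ⟨rfl, le_refl _⟩

lemma pairwise_true {α : Type} (l : List α) : l.Pairwise (fun _ _ => True) := by
  induction l with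
  | nil => exact List.Pairwise.nil
  | cons h t ih => exact ih.cons (by simp)

-- insertion keeps an insertion-sort accumulator pairwise-ordered
lemma pairwise_insertBy_of {α : Type} (le : α → α → Prop) (before : α → α → Bool)
    (htrans : ∀ a b c, le a b → le b c → le a c)
    (hT : ∀ a b, before a b = true → le a b) (x : α) :
    ∀ (acc : List α), (∀ y ∈ acc, before x y = false → le y x) → List.Pairwise le acc →
      List.Pairwise le (PySem.List.insertBy before x acc) := by
  intro acc
  induction acc with
  | nil => intro _ _; simp [PySem.List.insertBy]
  | cons y ys ih =>
    intro hskip hacc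
    have hrw : PySem.List.insertBy before x (y::ys)
        = if before x y then x :: y :: ys else y :: PySem.List.insertBy before x ys := rfl
    rw [hrw]
    rcases List.pairwise_cons.mp hacc with ⟨hy, hys⟩
    by_cases hxy : before x y = true
    · rw [if_pos hxy]
      refine List.pairwise_cons.mpr ⟨?_, hacc⟩
      intro z hz
      rcases List.mem_cons.mp hz with rfl | hz
      · exact hT _ _ hxy
      · exact htrans _ _ _ (hT _ _ hxy) (hy _ hz)
    · rw [if_neg hxy]
      refine List.pairwise_cons.mpr
        ⟨?_, ih (fun z hz hbz => hskip z (List.mem_cons_of_mem _ hz) hbz) hys⟩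
      intro z hz
      rcases (PySem.List.mem_insertBy before x z ys).mp hz with hz | hz
      · subst hz
        exact hskip y List.mem_cons_self (Bool.eq_false_iff.mpr hxy)
      · exact hy _ hz

-- a stable insertion sort is pairwise-ordered in 'le' when skipped ties fall back on the
-- input order 'prec'
lemma pairwise_foldl_insertBy {α : Type} (le prec : α → α → Prop) (before : α → α → Bool)
    (htrans : ∀ a b c, le a b → le b c → le a c)
    (hT : ∀ a b, before a b = true → le a b)
    (hF : ∀ a b, before a b = false → prec b a → le b a) :
    ∀ (xs acc : List α), List.Pairwise prec xs → (∀ a ∈ acc, ∀ x ∈ xs, prec a x) →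
      List.Pairwise le acc →
      List.Pairwise le (xs.foldl (fun acc x => PySem.List.insertBy before x acc) acc) := by
  intro xs
  induction xs with
  | nil => intro acc _ _ h; simpa using h
  | cons x t ih =>
    intro acc hxs hcond hacc
    rcases List.pairwise_cons.mp hxs with ⟨hx, ht⟩
    simp only [List.foldl_cons]
    refine ih _ ht ?_ ?_
    · intro a ha z hz
      rcases (PySem.List.mem_insertBy before x a acc).mp ha with rfl | ha
      · exact hx _ hz
      · exact hcond a ha z (List.mem_cons_of_mem _ hz)
    · refine pairwise_insertBy_of le before htrans hT x acc ?_ hacc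
      intro y hy hby
      exact hF _ _ hby (hcond y hy x List.mem_cons_self)

-- A's dict loop collects the distinct values in first-occurrence order, each with its count
lemma items_fold (m : List Int) : ∀ (l : List Int) (S : List Int),
    (l.foldl
        (fun d n => if d.contains n then d else d.setdefault n ((PySem.List.count m n : Int)))
        (PySem.Dict.mk (S.map (fun v => (v, (PySem.List.count m v : Int)))))).items
      = (PySem.Set.update S l).map (fun v => (v, (PySem.List.count m v : Int))) := by
  intro l
  induction l with
  | nil => intro S; simp [PySem.Set.update]
  | cons n t ih =>
    intro S
    have hcont : (PySem.Dict.mk (S.map (fun v => (v, (PySem.List.count m v : Int))))).contains n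
        = S.contains n := by
      rw [Bool.eq_iff_iff]
      simp [PySem.Dict.contains, List.any_map, Function.comp, List.any_eq_true]
    simp only [List.foldl_cons]
    have hupd : PySem.Set.update S (n :: t) = PySem.Set.update (PySem.Set.add S n) t := rfl
    rw [hupd]
    by_cases hn : n ∈ S
    · rw [if_pos (by rw [hcont]; simp [hn])]
      have : PySem.Set.add S n = S := by simp [PySem.Set.add, hn]
      rw [this]
      exact ih S
    · rw [if_neg (by rw [hcont]; simp [hn])]
      have hadd : PySem.Set.add S n = S ++ [n] := by simp [PySem.Set.add, hn]
      rw [hadd]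
      have hsd : (PySem.Dict.mk (S.map (fun v => (v, (PySem.List.count m v : Int))))).setdefault n
            ((PySem.List.count m n : Int))
          = PySem.Dict.mk ((S ++ [n]).map (fun v => (v, (PySem.List.count m v : Int)))) := by
        rw [PySem.Dict.setdefault_of_not_contains _ _ (by rw [hcont]; simp [hn])]
        rw [PySem.Dict.insert, if_neg (by rw [hcont]; simp [hn])]
        simp
      rw [hsd]
      exact ih (S ++ [n])

lemma foldl_const_append (v : Int) : ∀ (l : List Int) (acc : List Int),
    l.foldl (fun r (_ : Int) => r ++ [v]) acc = acc ++ List.replicate l.length v := by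
  intro l
  induction l with
  | nil => simp
  | cons h t ih =>
    intro acc
    simp only [List.foldl_cons, List.length_cons, List.replicate_succ]
    rw [ih]
    simp

lemma length_pyRange0 (c : Int) : (PySem.List.pyRange 0 c 1).length = c.toNat := by
  rw [PySem.List.pyRange_of_pos 0 c one_pos]
  simp
  intro h
  omega

lemma outer_eq : ∀ (ds : List (Int × Int)) (acc : List Int),
    ds.foldl (fun res pair =>
        (PySem.List.pyRange 0 pair.2 1).foldl (fun res _ => res ++ [pair.1]) res) acc
      = acc ++ ds.flatMap (fun p => List.replicate p.2.toNat p.1) := by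
  intro ds
  induction ds with
  | nil => simp
  | cons p t ih =>
    intro acc
    simp only [List.foldl_cons, List.flatMap_cons]
    rw [foldl_const_append, length_pyRange0, ih]
    simp

-- A in closed form: the distinct values sorted by count (stably), each expanded to its count
lemma Sixth_eq (m : List Int) :
    Sixth m = (PySem.List.sorted
        ((PySem.Set.ofList m).map (fun v => (v, (PySem.List.count m v : Int))))
        (fun x => x.2) true).flatMap (fun p => List.replicate p.2.toNat p.1) := by
  unfold Sixth
  rw [outer_eq]
  have h0 : (PySem.Dict.empty : PySem.Dict Int Int)
      = PySem.Dict.mk (([] : List Int).map (fun v => (v, (PySem.List.count m v : Int)))) := rfl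
  rw [h0, items_fold]
  rfl

lemma count_flatMap_rep (l : List Int) : ∀ (vs : List Int), vs.Nodup → ∀ (a : Int),
    List.count a (vs.flatMap (fun v => List.replicate (List.count v l) v))
      = if a ∈ vs then List.count a l else 0 := by
  intro vs
  induction vs with
  | nil => simp
  | cons v t ih =>
    intro hnd a
    rcases List.nodup_cons.mp hnd with ⟨hv, ht⟩
    simp only [List.flatMap_cons, List.count_append, ih ht a, List.count_replicate]
    by_cases hav : a = v
    · subst hav
      simp [hv]
    · simp [Ne.symm hav, hav]

-- the distinct values appear in order of their first occurrence in m
lemma pairwise_idxOf_ofList (m : List Int) :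
    List.Pairwise (fun a b => m.idxOf a < m.idxOf b) (PySem.Set.ofList m) := by
  induction m using List.reverseRecOn with
  | nil => simp [PySem.Set.ofList]
  | append_singleton t x ih =>
    have hof : PySem.Set.ofList (t ++ [x]) = PySem.Set.add (PySem.Set.ofList t) x := by
      simp [PySem.Set.ofList, List.foldl_append]
    rw [hof]
    by_cases hx : x ∈ t
    · have hmem : x ∈ PySem.Set.ofList t := (PySem.Set.mem_ofList t x).mpr hx
      have : PySem.Set.add (PySem.Set.ofList t) x = PySem.Set.ofList t := by
        simp [PySem.Set.add, hmem]
      rw [this]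
      refine ih.imp_of_mem ?_
      intro a b ha hb hab
      have ham := (PySem.Set.mem_ofList t a).mp ha
      have hbm := (PySem.Set.mem_ofList t b).mp hb
      rw [List.idxOf_append, List.idxOf_append, if_pos ham, if_pos hbm]
      exact hab
    · have hmem : x ∉ PySem.Set.ofList t := fun h => hx ((PySem.Set.mem_ofList t x).mp h)
      have : PySem.Set.add (PySem.Set.ofList t) x = PySem.Set.ofList t ++ [x] := by
        simp [PySem.Set.add, hmem]
      rw [this]
      rw [List.pairwise_append]
      refine ⟨?_, by simp, ?_⟩
      · refine ih.imp_of_mem ?_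
        intro a b ha hb hab
        have ham := (PySem.Set.mem_ofList t a).mp ha
        have hbm := (PySem.Set.mem_ofList t b).mp hb
        rw [List.idxOf_append, List.idxOf_append, if_pos ham, if_pos hbm]
        exact hab
      · intro a ha b hb
        have ham := (PySem.Set.mem_ofList t a).mp ha
        rcases List.mem_singleton.mp hb with rfl
        rw [List.idxOf_append, List.idxOf_append, if_pos ham, if_neg hx]
        have h1 := List.idxOf_lt_length_of_mem ham
        simp
        omega

lemma perm_A (m : List Int) : (Sixth m).Perm m := by
  rw [Sixth_eq]
  set items' := (PySem.Set.ofList m).map (fun v => (v, (PySem.List.count m v : Int))) with hitems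
  have h1 : ((PySem.List.sorted items' (fun x => x.2) true).flatMap
      (fun p => List.replicate p.2.toNat p.1)).Perm
      (items'.flatMap (fun p => List.replicate p.2.toNat p.1)) :=
    (PySem.List.sorted_perm items' (fun x => x.2) true).flatMap (fun a _ => List.Perm.refl _)
  refine h1.trans ?_
  rw [hitems, List.flatMap_map]
  have h2 : ((PySem.Set.ofList m).flatMap
      (fun v => List.replicate ((PySem.List.count m v : Int)).toNat v))
      = (PySem.Set.ofList m).flatMap (fun v => List.replicate (List.count v m) v) := by
    simp [PySem.List.count]
  rw [h2]
  rw [List.perm_iff_count]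
  intro a
  rw [count_flatMap_rep m _ (PySem.Set.nodup_ofList m) a]
  by_cases ha : a ∈ m
  · simp [(PySem.Set.mem_ofList m a).mpr ha]
  · simp [ha, List.count_eq_zero_of_not_mem ha]

lemma pairwise_A (m : List Int) : List.Pairwise (leD m) (Sixth m) := by
  rw [Sixth_eq]
  set items' := (PySem.Set.ofList m).map (fun v => (v, (PySem.List.count m v : Int))) with hitems
  rw [List.pairwise_flatMap]
  constructor
  · intro p _
    exact List.pairwise_replicate.mpr (Or.inr (leD_refl m p.1))
  · have hstable : List.Pairwise
        (fun (p q : Int × Int) => q.2 < p.2 ∨ (p.2 = q.2 ∧ m.idxOf p.1 < m.idxOf q.1))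
        (PySem.List.sorted items' (fun x => x.2) true) := by
      rw [PySem.List.sorted_rev_eq_foldl_insertBy]
      refine pairwise_foldl_insertBy _ (fun p q => m.idxOf p.1 < m.idxOf q.1) _
        ?_ ?_ ?_ items' [] ?_ (by simp) List.Pairwise.nil
      · intro a b c hab hbc; omega
      · intro a b h
        simp only [decide_eq_true_eq] at h
        omega
      · intro a b h hp
        simp only [decide_eq_false_iff_not] at h
        omega
      · rw [hitems, List.pairwise_map]
        exact pairwise_idxOf_ofList m
    have hmemi : ∀ p ∈ PySem.List.sorted items' (fun x => x.2) true,
        p.1 ∈ m ∧ p.2 = (List.count p.1 m : Int) := by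
      intro p hp
      have hpi : p ∈ items' := (PySem.List.sorted_perm items' (fun x => x.2) true).mem_iff.mp hp
      rw [hitems] at hpi
      rcases List.mem_map.mp hpi with ⟨v, hv, rfl⟩
      exact ⟨(PySem.Set.mem_ofList m v).mp hv, rfl⟩
    refine hstable.imp_of_mem ?_
    intro p q hp hq hle x hx y hy
    have hx' := List.eq_of_mem_replicate hx
    have hy' := List.eq_of_mem_replicate hy
    subst hx' hy'
    rcases hmemi p hp with ⟨hpm, hpc⟩
    rcases hmemi q hq with ⟨hqm, hqc⟩
    unfold leD
    rw [cF_eq, cF_eq, fF_eq m p.1 hpm, fF_eq m q.1 hqm]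
    rcases hle with h | ⟨h1, h2⟩
    · left; omega
    · right; constructor <;> omega

lemma pairwise_B (m : List Int) : List.Pairwise (leD m) (Sixth_alt m) := by
  have halt : Sixth_alt m = m.foldl (fun acc x => PySem.List.insertBy
      (fun a b => (decide (-(cF m a) < -(cF m b)) ||
        (!decide (-(cF m b) < -(cF m a)) && decide (fF m a < fF m b)))) x acc) [] := rfl
  rw [halt]
  refine pairwise_foldl_insertBy (leD m) (fun _ _ => True) _ ?_ ?_ ?_ m [] (pairwise_true m)
    (by simp) List.Pairwise.nil
  · intro a b c hab hbc
    unfold leD at *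
    omega
  · intro a b h
    simp only [Bool.or_eq_true, Bool.and_eq_true, Bool.not_eq_eq_eq_not, Bool.not_true,
      decide_eq_true_eq, decide_eq_false_iff_not] at h
    unfold leD
    omega
  · intro a b h _
    simp only [Bool.or_eq_false_iff, Bool.and_eq_false_iff] at h
    obtain ⟨h1, h2⟩ := h
    rw [decide_eq_false_iff_not] at h1
    unfold leD
    rcases h2 with h2 | h2
    · rw [Bool.not_eq_false'] at h2
      rw [decide_eq_true_eq] at h2
      omega
    · rw [decide_eq_false_iff_not] at h2
      omega

-- ===== VERDICT (by name: the statement is the Claim_ definition above) =====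
theorem Sixth_spec : Claim_equal_Sixth := by
  intro m _
  show Sixth m = Sixth_alt m
  have hpermB : (Sixth_alt m).Perm m := by
    rw [alt_eq]
    exact PySem.List.sorted2_perm m _ _ false
  refine List.Perm.eq_of_pairwise ?_ (pairwise_A m) (pairwise_B m)
    ((perm_A m).trans hpermB.symm)
  intro a b ha hb hab hba
  have ham : a ∈ m := (perm_A m).mem_iff.mp ha
  have hbm : b ∈ m := hpermB.mem_iff.mp hb
  have hf : fF m a = fF m b := by
    rcases hab with h1 | ⟨h1, h2⟩ <;> rcases hba with h3 | ⟨h3, h4⟩ <;> omega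
  have hidx : m.idxOf a = m.idxOf b := by
    have h1 := fF_eq m a ham
    have h2 := fF_eq m b hbm
    omega
  have hla := List.idxOf_lt_length_of_mem ham
  have hlb := List.idxOf_lt_length_of_mem hbm
  calc a = m[m.idxOf a] := (List.getElem_idxOf hla).symm
    _ = m[m.idxOf b] := by simp_rw [hidx]
    _ = b := List.getElem_idxOf hlb
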